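-- pv_equiv track=rewrite | github.com/cxbeltzz/SmartBite | Proyecto/v2/app.py | _build_meal_keys
-- ===== SOURCE A (Python) =====
-- from typing import Dict, List, Tuple
--
-- MEAL_LABELS: Dict[str, str] = {
--     "breakfast": "Desayuno",
--     "lunch": "Almuerzo",
--     "dinner": "Cena",
-- }
--
-- def _build_meal_keys(meals_per_day: int) -> List[str]:
--     base_sequence = list(MEAL_LABELS.keys())
--     keys: List[str] = []
--     for idx in range(max(meals_per_day, 1)):
--         if idx < len(base_sequence):
--             keys.append(base_sequence[idx])
--         else:
--             keys.append(f"meal_{idx + 1}")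
--     return keys
-- ===== SOURCE B (Python) =====
-- from typing import Dict, List
--
-- MEAL_LABELS: Dict[str, str] = {
--     "breakfast": "Desayuno",
--     "lunch": "Almuerzo",
--     "dinner": "Cena",
-- }
--
-- def _build_meal_keys(meals_per_day: int) -> List[str]:
--     # Generate all n keys synthetically, then slice-assign the labelled
--     # names over the prefix (no per-index branching).
--     n = max(meals_per_day, 1)
--     keys = [f"meal_{i}" for i in range(1, n + 1)]
--     keys[:len(MEAL_LABELS)] = list(MEAL_LABELS)[:n]
--     return keys
-- ===== Notes on version B (the rewrite author's own statement) =====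
-- stated objective: alternative
-- what changed: B first generates all n keys as synthetic meal_i names in one comprehension and then overwrites the prefix with the labelled keys via a slice assignment, instead of A's single loop that branches per index between label lookup and name generation.
import Mathlib
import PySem

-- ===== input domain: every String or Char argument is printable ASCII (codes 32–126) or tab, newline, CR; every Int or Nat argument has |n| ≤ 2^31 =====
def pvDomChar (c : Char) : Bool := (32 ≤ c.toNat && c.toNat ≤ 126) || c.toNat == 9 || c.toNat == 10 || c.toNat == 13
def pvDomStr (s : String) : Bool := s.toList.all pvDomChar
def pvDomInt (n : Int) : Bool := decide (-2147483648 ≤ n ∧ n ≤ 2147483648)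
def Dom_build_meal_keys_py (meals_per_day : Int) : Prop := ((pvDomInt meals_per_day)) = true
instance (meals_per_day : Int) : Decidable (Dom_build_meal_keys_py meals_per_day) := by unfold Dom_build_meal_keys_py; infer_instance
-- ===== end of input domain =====

-- B generates all n keys as synthetic "meal_i" names in one pass and then overwrites the
-- prefix with the labelled keys by a slice assignment (objective: alternative).

-- ===== PORT A =====
def MEAL_LABELS : PySem.Dict String String :=
  PySem.Dict.ofList [("breakfast", "Desayuno"), ("lunch", "Almuerzo"), ("dinner", "Cena")]

def build_meal_keys_py (meals_per_day : Int) : List String :=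
  let base_sequence := PySem.Dict.keys MEAL_LABELS
  (PySem.List.pyRange 0 (max meals_per_day 1) 1).foldl
    (fun keys idx =>
      if idx < (base_sequence.length : Int) then
        keys ++ [PySem.List.pyGetD base_sequence idx ""]
      else
        keys ++ ["meal_" ++ PySem.Int.toStr (idx + 1)])
    []

-- ===== PORT B =====
-- slice assignment keys[:k] = vals (0 ≤ k) is ported as vals ++ keys[k:]
def build_meal_keys_py_alt (meals_per_day : Int) : List String :=
  let n := max meals_per_day 1
  let keys := (PySem.List.pyRange 1 (n + 1) 1).map (fun i => "meal_" ++ PySem.Int.toStr i)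
  PySem.List.slice (PySem.Dict.keys MEAL_LABELS) none (some n) ++
    PySem.List.slice keys (some (((MEAL_LABELS.items).length : Int))) none

-- ===== PRECONDITION & SPEC =====
def Spec_build_meal_keys_py (meals_per_day : Int) (out : List String) : Prop := out = build_meal_keys_py_alt meals_per_day
instance (meals_per_day : Int) (out : List String) : Decidable (Spec_build_meal_keys_py meals_per_day out) := by unfold Spec_build_meal_keys_py; infer_instance

-- ===== CLAIM (what is proved, stated in full; the proofs are below) =====
def Claim_equal_build_meal_keys_py : Prop := ∀ (meals_per_day : Int), Dom_build_meal_keys_py meals_per_day → Spec_build_meal_keys_py meals_per_day (build_meal_keys_py meals_per_day)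

-- ===== LEMMAS AND PROOFS =====

-- Both ports depend on the input only through n = max meals_per_day 1; this proves equality
-- for every n ≥ 1 (n < 3 by evaluation; n ≥ 3 by splitting both ranges at the prefix length).
theorem pv_core (n : Int) (hn : 1 ≤ n) :
    (PySem.List.pyRange 0 n 1).foldl
      (fun keys idx =>
        if idx < ((PySem.Dict.keys MEAL_LABELS).length : Int) then
          keys ++ [PySem.List.pyGetD (PySem.Dict.keys MEAL_LABELS) idx ""]
        else
          keys ++ ["meal_" ++ PySem.Int.toStr (idx + 1)]) [] =
    PySem.List.slice (PySem.Dict.keys MEAL_LABELS) none (some n) ++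
      PySem.List.slice
        ((PySem.List.pyRange 1 (n + 1) 1).map (fun i => "meal_" ++ PySem.Int.toStr i))
        (some (((MEAL_LABELS.items).length : Int))) none := by
  rcases lt_or_ge n 3 with h3 | h3
  · interval_cases n <;> decide
  · -- A side: first three indices yield the labels, the rest the generated names
    rw [PySem.List.pyRange_one_append 0 3 n (by norm_num) h3, List.foldl_append]
    have hpre :
        (PySem.List.pyRange 0 3 1).foldl
          (fun keys idx =>
            if idx < ((PySem.Dict.keys MEAL_LABELS).length : Int) then
              keys ++ [PySem.List.pyGetD (PySem.Dict.keys MEAL_LABELS) idx ""]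
            else
              keys ++ ["meal_" ++ PySem.Int.toStr (idx + 1)]) [] =
          ["breakfast", "lunch", "dinner"] := by decide
    rw [hpre]
    have hbody : ∀ (acc : List String) (idx : Int), idx ∈ PySem.List.pyRange 3 n 1 →
        (if idx < ((PySem.Dict.keys MEAL_LABELS).length : Int) then
          acc ++ [PySem.List.pyGetD (PySem.Dict.keys MEAL_LABELS) idx ""]
        else acc ++ ["meal_" ++ PySem.Int.toStr (idx + 1)]) =
        acc ++ ["meal_" ++ PySem.Int.toStr (idx + 1)] := by
      intro acc idx hmem
      rw [PySem.List.mem_pyRange_one] at hmem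
      have hlen : ((PySem.Dict.keys MEAL_LABELS).length : Int) = 3 := by decide
      rw [hlen, if_neg (by omega)]
    rw [PySem.List.foldl_congr_mem (PySem.List.pyRange 3 n 1) _
      (fun acc idx => acc ++ ["meal_" ++ PySem.Int.toStr (idx + 1)]) _ hbody]
    rw [PySem.List.foldl_append_singleton_eq_map]
    -- B side: the slice of labels is all three labels
    have hslice : PySem.List.slice (PySem.Dict.keys MEAL_LABELS) none (some n) =
        ["breakfast", "lunch", "dinner"] := by
      rw [PySem.List.slice_to _ (by omega)]
      have hk : PySem.Dict.keys MEAL_LABELS = ["breakfast", "lunch", "dinner"] := by decide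
      rw [hk, List.take_of_length_le (by simp; omega)]
    rw [hslice]
    -- B side: dropping the first three synthetic names leaves names for indices 4..n
    have hitems : (((MEAL_LABELS.items).length : Int)) = (3 : Int) := by decide
    rw [hitems, PySem.List.slice_from _ (by omega)]
    rw [PySem.List.pyRange_one_append 1 4 (n + 1) (by norm_num) (by omega), List.map_append]
    have h4 : PySem.List.pyRange 1 4 1 = [1, 2, 3] := by decide
    rw [h4]
    rw [List.drop_append_of_le_length (by simp), List.drop_eq_nil_of_le (by simp),
      List.nil_append]
    congr 1
    rw [PySem.List.pyRange_one, PySem.List.pyRange_one]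
    have hlen : ((n : Int) - 3).toNat = ((n + 1) - 4).toNat := by omega
    rw [hlen, List.map_map, List.map_map]
    apply List.map_congr_left
    intro k _
    simp only [Function.comp_apply]
    congr 2
    omega

-- ===== VERDICT (by name: the statement is the Claim_ definition above) =====
theorem build_meal_keys_py_spec : Claim_equal_build_meal_keys_py := by
  intro m _
  show _ = _
  unfold build_meal_keys_py build_meal_keys_py_alt
  exact pv_core (max m 1) (le_max_right m 1)
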